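-- pv_equiv track=rewrite | github.com/ananth-pallaseni/cell-tracker | __test.py | get_bounding_boxes
-- ===== SOURCE A (Python) =====
-- def get_bounding_boxes(blobs):
-- 	bboxes = []
--
-- 	for i in range(len(blobs)):
-- 	    zs = [b[0] for b in blobs[i]]
-- 	    minz = min(zs)
-- 	    maxz = max(zs)
--
-- 	    ys = [b[1] for b in blobs[i]]
-- 	    miny = min(ys)
-- 	    maxy = max(ys)
--
-- 	    xs = [b[2] for b in blobs[i]]
-- 	    minx = min(xs)
-- 	    maxx = max(xs)
--
-- 	    bboxes.append((minz, maxz, miny, maxy, minx, maxx))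
--
-- 	return bboxes
-- ===== SOURCE B (Python) =====
-- def get_bounding_boxes(blobs):
--     bboxes = []
--     for blob in blobs:
--         first = blob[0]
--         minz = maxz = first[0]
--         miny = maxy = first[1]
--         minx = maxx = first[2]
--         for b in blob[1:]:
--             if b[0] < minz: minz = b[0]
--             if b[0] > maxz: maxz = b[0]
--             if b[1] < miny: miny = b[1]
--             if b[1] > maxy: maxy = b[1]
--             if b[2] < minx: minx = b[2]
--             if b[2] > maxx: maxx = b[2]
--         bboxes.append((minz, maxz, miny, maxy, minx, maxx))
--     return bboxes
-- ===== Notes on version B (the rewrite author's own statement) =====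
-- stated objective: alternative
-- what changed: Replaces the six separate list-builds with min/max scans per group by a single pass over each group's points updating six accumulators at once.
import Mathlib
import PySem

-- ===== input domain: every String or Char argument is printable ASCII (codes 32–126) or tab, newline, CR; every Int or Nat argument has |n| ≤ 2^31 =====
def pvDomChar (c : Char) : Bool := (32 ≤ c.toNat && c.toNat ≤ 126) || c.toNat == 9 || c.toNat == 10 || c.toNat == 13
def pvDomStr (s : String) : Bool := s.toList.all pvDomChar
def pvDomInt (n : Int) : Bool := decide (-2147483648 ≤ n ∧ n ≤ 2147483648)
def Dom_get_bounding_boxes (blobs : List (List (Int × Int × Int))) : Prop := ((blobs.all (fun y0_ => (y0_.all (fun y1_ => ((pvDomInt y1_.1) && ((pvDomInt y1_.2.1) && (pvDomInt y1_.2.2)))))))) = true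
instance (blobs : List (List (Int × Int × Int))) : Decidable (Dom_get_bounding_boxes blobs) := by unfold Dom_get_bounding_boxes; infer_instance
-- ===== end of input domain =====

-- B replaces A's six separate min/max scans per group by one pass updating six accumulators.

-- ===== PORT A =====
-- A: for each index i, build zs/ys/xs and take min/max of each; min/max of [] raises (excluded by Pre_).
def get_bounding_boxes (blobs : List (List (Int × Int × Int))) : List (Int × Int × Int × Int × Int × Int) :=
  (PySem.List.pyRange 0 (blobs.length : Int) 1).foldl
    (fun bboxes i =>
      let blob := PySem.List.pyGetD blobs i []
      let zs := blob.map (fun b => b.1)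
      let minz := (PySem.List.min? zs (fun y => y)).getD 0
      let maxz := (PySem.List.max? zs (fun y => y)).getD 0
      let ys := blob.map (fun b => b.2.1)
      let miny := (PySem.List.min? ys (fun y => y)).getD 0
      let maxy := (PySem.List.max? ys (fun y => y)).getD 0
      let xs := blob.map (fun b => b.2.2)
      let minx := (PySem.List.min? xs (fun y => y)).getD 0
      let maxx := (PySem.List.max? xs (fun y => y)).getD 0
      bboxes ++ [(minz, maxz, miny, maxy, minx, maxx)]) []

-- ===== PORT B =====
-- B helper: one pass over the points after the first, updating six accumulators (blob[0] of [] raises; excluded by Pre_, default here).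
def pvBBox (blob : List (Int × Int × Int)) : Int × Int × Int × Int × Int × Int :=
  match blob with
  | [] => (0, 0, 0, 0, 0, 0)
  | f :: rest =>
    rest.foldl
      (fun s b =>
        (if b.1 < s.1 then b.1 else s.1,
         if b.1 > s.2.1 then b.1 else s.2.1,
         if b.2.1 < s.2.2.1 then b.2.1 else s.2.2.1,
         if b.2.1 > s.2.2.2.1 then b.2.1 else s.2.2.2.1,
         if b.2.2 < s.2.2.2.2.1 then b.2.2 else s.2.2.2.2.1,
         if b.2.2 > s.2.2.2.2.2 then b.2.2 else s.2.2.2.2.2))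
      (f.1, f.1, f.2.1, f.2.1, f.2.2, f.2.2)

def get_bounding_boxes_alt (blobs : List (List (Int × Int × Int))) : List (Int × Int × Int × Int × Int × Int) :=
  blobs.foldl (fun bboxes blob => bboxes ++ [pvBBox blob]) []

-- ===== PRECONDITION & SPEC =====
-- Pre_ excludes inputs containing an empty group, on which A raises ValueError (min of an empty list) and B raises IndexError.
def Pre_get_bounding_boxes (blobs : List (List (Int × Int × Int))) : Prop :=
  ∀ blob ∈ blobs, blob ≠ []
instance (blobs : List (List (Int × Int × Int))) : Decidable (Pre_get_bounding_boxes blobs) := by unfold Pre_get_bounding_boxes; infer_instance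
def pvWitness_get_bounding_boxes : (List (List (Int × Int × Int))) :=
  [[(1, 2, 3), (0, 5, -1)], [(4, 4, 4)]]

def Spec_get_bounding_boxes (blobs : List (List (Int × Int × Int))) (out : List (Int × Int × Int × Int × Int × Int)) : Prop := out = get_bounding_boxes_alt blobs
instance (blobs : List (List (Int × Int × Int))) (out : List (Int × Int × Int × Int × Int × Int)) : Decidable (Spec_get_bounding_boxes blobs out) := by unfold Spec_get_bounding_boxes; infer_instance

-- ===== CLAIM (what is proved, stated in full; the proofs are below) =====
def Claim_equal_get_bounding_boxes : Prop := ∀ (blobs : List (List (Int × Int × Int))), Dom_get_bounding_boxes blobs → Pre_get_bounding_boxes blobs → Spec_get_bounding_boxes blobs (get_bounding_boxes blobs)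

-- ===== LEMMAS AND PROOFS =====

-- B's single fold splits into six independent running min/max folds.
theorem pvBBox_fold_split (rest : List (Int × Int × Int))
    (mz Mz my My mx Mx : Int) :
    rest.foldl
      (fun s b =>
        (if b.1 < s.1 then b.1 else s.1,
         if b.1 > s.2.1 then b.1 else s.2.1,
         if b.2.1 < s.2.2.1 then b.2.1 else s.2.2.1,
         if b.2.1 > s.2.2.2.1 then b.2.1 else s.2.2.2.1,
         if b.2.2 < s.2.2.2.2.1 then b.2.2 else s.2.2.2.2.1,
         if b.2.2 > s.2.2.2.2.2 then b.2.2 else s.2.2.2.2.2))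
      (mz, Mz, my, My, mx, Mx)
    = ((rest.map (fun b => b.1)).foldl min mz,
       (rest.map (fun b => b.1)).foldl max Mz,
       (rest.map (fun b => b.2.1)).foldl min my,
       (rest.map (fun b => b.2.1)).foldl max My,
       (rest.map (fun b => b.2.2)).foldl min mx,
       (rest.map (fun b => b.2.2)).foldl max Mx) := by
  induction rest generalizing mz Mz my My mx Mx with
  | nil => rfl
  | cons b t ih =>
    have hmin : ∀ x a : Int, (if x < a then x else a) = min a x := by intro x a; omega
    have hmax : ∀ x a : Int, (if x > a then x else a) = max a x := by intro x a; omega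
    simp only [List.foldl_cons, List.map_cons]
    rw [ih]
    simp only [hmin, hmax]

-- Per nonempty blob, A's six min/max calls equal B's single fold.
theorem pvBBox_eq (blob : List (Int × Int × Int)) (h : blob ≠ []) :
    ((PySem.List.min? (blob.map (fun b => b.1)) (fun y => y)).getD 0,
     (PySem.List.max? (blob.map (fun b => b.1)) (fun y => y)).getD 0,
     (PySem.List.min? (blob.map (fun b => b.2.1)) (fun y => y)).getD 0,
     (PySem.List.max? (blob.map (fun b => b.2.1)) (fun y => y)).getD 0,
     (PySem.List.min? (blob.map (fun b => b.2.2)) (fun y => y)).getD 0,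
     (PySem.List.max? (blob.map (fun b => b.2.2)) (fun y => y)).getD 0)
    = pvBBox blob := by
  match blob, h with
  | f :: rest, _ =>
    simp only [List.map_cons, PySem.List.min?_id_cons, PySem.List.max?_id_cons,
      Option.getD_some, pvBBox, pvBBox_fold_split]

-- ===== VERDICT (by name: the statement is the Claim_ definition above) =====
theorem get_bounding_boxes_spec : Claim_equal_get_bounding_boxes := by
  intro blobs _ hpre
  unfold Spec_get_bounding_boxes get_bounding_boxes get_bounding_boxes_alt
  rw [PySem.List.foldl_pyRange_zero_pyGetD' blobs []
    (fun bboxes blob =>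
      bboxes ++ [((PySem.List.min? (blob.map (fun b => b.1)) (fun y => y)).getD 0,
        (PySem.List.max? (blob.map (fun b => b.1)) (fun y => y)).getD 0,
        (PySem.List.min? (blob.map (fun b => b.2.1)) (fun y => y)).getD 0,
        (PySem.List.max? (blob.map (fun b => b.2.1)) (fun y => y)).getD 0,
        (PySem.List.min? (blob.map (fun b => b.2.2)) (fun y => y)).getD 0,
        (PySem.List.max? (blob.map (fun b => b.2.2)) (fun y => y)).getD 0)]) []]
  apply PySem.List.foldl_congr_mem
  intro acc blob hmem
  rw [pvBBox_eq blob (hpre blob hmem)]
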